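-- pv_equiv track=rewrite | github.com/JJohanJV/Sistema-de-compatibilidad-para-relaciones-sociales | proyecto/leerArchivo.py | similitudes
-- ===== SOURCE A (Python) =====
-- def similitudes(palabra1, palabra2):
--     conter = 0
--     pal1 = ""
--     for i in palabra1:
--         if(pal1 == "" and i == ' '):
--             continue
--         if(i != ','):
--             pal1 += i
--         else:
--             pal2 = ""
--             for j in palabra2:
--                 if(pal2 == "" and j == ' '):
--                     continue
--                 if(j != ','):
--                     pal2 += j
--                 else:
--                     if(pal1 == pal2):
--                         conter +=1
--                     pal2 = ""
--             if(pal2 != "" and pal1 == pal2):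
--                 conter +=1
--             pal1 = ""
--     if(pal1 != ""):
--         pal2 = ""
--         for j in palabra2:
--             if(pal2 == "" and j == ' '):
--                 continue
--             if(j != ','):
--                 pal2 += j
--             else:
--                 if(pal1 == pal2):
--                     conter +=1
--                 pal2 = ""
--         if(pal2 != "" and pal1 == pal2):
--             conter +=1
--         pal1 = ""
--     return conter
-- ===== SOURCE B (Python) =====
-- from collections import Counter
--
-- def similitudes(palabra1, palabra2):
--     def tokenize(s):
--         toks = [seg.lstrip(' ') for seg in s.split(',')]
--         if toks and toks[-1] == '':
--             toks.pop()
--         return toks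
--     c = Counter(tokenize(palabra2))
--     return sum(c[x] for x in tokenize(palabra1))
-- ===== Notes on version B (the rewrite author's own statement) =====
-- stated objective: faster
-- what changed: A's char-by-char state machine that rescans palabra2 once per token of palabra1 is replaced by split(',')-based tokenization of both strings plus a single Counter(tokens2) pass, summing counter lookups over tokens1.
import Mathlib
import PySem

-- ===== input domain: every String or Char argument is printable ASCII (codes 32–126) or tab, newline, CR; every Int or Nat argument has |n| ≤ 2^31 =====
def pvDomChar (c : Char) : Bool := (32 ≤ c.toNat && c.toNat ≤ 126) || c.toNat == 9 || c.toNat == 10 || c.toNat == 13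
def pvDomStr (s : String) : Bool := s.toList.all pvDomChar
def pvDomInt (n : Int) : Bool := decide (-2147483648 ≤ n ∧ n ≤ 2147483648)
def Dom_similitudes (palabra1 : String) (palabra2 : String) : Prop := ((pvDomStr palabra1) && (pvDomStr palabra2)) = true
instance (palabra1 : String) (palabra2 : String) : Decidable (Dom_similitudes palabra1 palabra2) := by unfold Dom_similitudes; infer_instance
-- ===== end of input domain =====

-- B replaces A's char-by-char nested rescans with split-based tokenization plus one Counter pass (objective: faster).

-- ===== PORT A =====
-- the inner 'for j in palabra2' loop plus the trailing 'if pal2 != ""' check, as in A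
def similitudesInner (l2 : List Char) (pal1 : List Char) (conter : Int) : Int :=
  let st := l2.foldl (fun (st : Int × List Char) j =>
      if st.2 = [] ∧ j = ' ' then st
      else if j ≠ ',' then (st.1, st.2 ++ [j])
      else (if pal1 = st.2 then st.1 + 1 else st.1, []))
    (conter, [])
  if st.2 ≠ [] ∧ pal1 = st.2 then st.1 + 1 else st.1

def similitudes (palabra1 : String) (palabra2 : String) : Int :=
  let l2 := palabra2.toList
  let st := palabra1.toList.foldl (fun (st : Int × List Char) i =>
      if st.2 = [] ∧ i = ' ' then st
      else if i ≠ ',' then (st.1, st.2 ++ [i])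
      else (similitudesInner l2 st.2 st.1, []))
    (0, [])
  if st.2 ≠ [] then similitudesInner l2 st.2 st.1 else st.1

-- ===== PORT B =====
-- hand port of s.split(',') (exact for this single-character separator: Python returns [''] on '')
def pvSplit : List Char → List (List Char)
  | [] => [[]]
  | c :: cs => if c = ',' then [] :: pvSplit cs else (pvSplit cs).modifyHead (c :: ·)

-- tokenize of Source B: lstrip(' ') each segment, pop the last iff it is ''
def pvTokenize (s : List Char) : List (List Char) :=
  let toks := (pvSplit s).map (fun seg => seg.dropWhile (· == ' '))
  match toks.getLast? with
  | some [] => toks.dropLast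
  | _ => toks

def similitudes_alt (palabra1 : String) (palabra2 : String) : Int :=
  let c := PySem.Dict.counter (pvTokenize palabra2.toList)
  ((pvTokenize palabra1.toList).map (fun x => c.getD x 0)).sum

-- ===== PRECONDITION & SPEC =====
def Spec_similitudes (palabra1 : String) (palabra2 : String) (out : Int) : Prop := out = similitudes_alt palabra1 palabra2
instance (palabra1 : String) (palabra2 : String) (out : Int) : Decidable (Spec_similitudes palabra1 palabra2 out) := by unfold Spec_similitudes; infer_instance

-- ===== CLAIM (what is proved, stated in full; the proofs are below) =====
def Claim_equal_similitudes : Prop := ∀ (palabra1 : String) (palabra2 : String), Dom_similitudes palabra1 palabra2 → Spec_similitudes palabra1 palabra2 (similitudes palabra1 palabra2)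

-- ===== LEMMAS AND PROOFS =====

-- spec-side scanner: completed tokens so far and the current (lstripped) partial token
def pvScan : List Char → List Char → List (List Char) × List Char
  | pal, [] => ([], pal)
  | pal, j :: rest =>
    if pal = [] ∧ j = ' ' then pvScan pal rest
    else if j ≠ ',' then pvScan (pal ++ [j]) rest
    else ((pvScan [] rest).1.cons pal, (pvScan [] rest).2)

-- the token list both sides compute, expressed via pvScan
def pvToks (l : List Char) : List (List Char) :=
  (pvScan [] l).1 ++ (if (pvScan [] l).2 = [] then [] else [(pvScan [] l).2])

theorem pvScan_fold (pal1 : List Char) :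
    ∀ (l pal : List Char) (c : Int),
    l.foldl (fun (st : Int × List Char) j =>
      if st.2 = [] ∧ j = ' ' then st
      else if j ≠ ',' then (st.1, st.2 ++ [j])
      else (if pal1 = st.2 then st.1 + 1 else st.1, [])) (c, pal)
    = (c + ((pvScan pal l).1.count pal1 : Int), (pvScan pal l).2) := by
  intro l
  induction l with
  | nil => intro pal c; simp [pvScan]
  | cons j rest ih =>
    intro pal c
    simp only [List.foldl_cons, pvScan]
    split_ifs with h1 h2
    · exact ih pal c
    · exact ih (pal ++ [j]) c
    · -- j = ',' and pal1 = pal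
      rename_i h3
      rw [ih [] (c + 1)]
      simp [h3]
      ring
    · -- j = ',' and pal1 ≠ pal
      rename_i h3
      have hba : ¬ (pal == pal1) = true := by
        simp only [beq_iff_eq]; exact fun h => h3 h.symm
      rw [ih [] c]
      simp [List.count_cons, hba]

theorem similitudesInner_eq (l2 pal1 : List Char) (c : Int) :
    similitudesInner l2 pal1 c = c + ((pvToks l2).count pal1 : Int) := by
  unfold similitudesInner pvToks
  rw [pvScan_fold pal1 l2 [] c]
  by_cases hfin : (pvScan [] l2).2 = []
  · simp [hfin]
  · by_cases heq : pal1 = (pvScan [] l2).2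
    · simp [hfin, heq, List.count_append, List.count_cons]
      push_cast; ring
    · have : ¬ ((pvScan [] l2).2 == pal1) = true := by
        simp only [beq_iff_eq]; exact fun h => heq h.symm
      simp [hfin, List.count_append, List.count_cons, this]
      exact heq

theorem pvSplit_ne_nil : ∀ l : List Char, pvSplit l ≠ [] := by
  intro l
  cases l with
  | nil => simp [pvSplit]
  | cons c cs =>
    simp only [pvSplit]
    split_ifs
    · simp
    · intro h
      have := congrArg List.length h
      simp [List.length_modifyHead] at this
      exact pvSplit_ne_nil cs this

theorem pvScan_split :
    ∀ (l pal : List Char),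
    (pvScan pal l).1 ++ [(pvScan pal l).2]
      = (if pal = [] then ((pvSplit l).headI).dropWhile (· == ' ') else pal ++ (pvSplit l).headI)
        :: ((pvSplit l).tail).map (fun seg => seg.dropWhile (· == ' ')) := by
  intro l
  induction l with
  | nil =>
    intro pal
    by_cases h : pal = [] <;> simp [pvScan, pvSplit, h]
  | cons j rest ih =>
    intro pal
    obtain ⟨s0, ss, hs⟩ := List.exists_cons_of_ne_nil (pvSplit_ne_nil rest)
    by_cases h1 : pal = [] ∧ j = ' '
    · have hj : ¬ j = ',' := by
        intro h; rw [h] at h1; exact absurd h1.2 (by decide)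
      rw [show pvScan pal (j :: rest) = pvScan pal rest from by rw [pvScan, if_pos h1]]
      rw [show pvSplit (j :: rest) = (j :: s0) :: ss from by
            rw [pvSplit, if_neg hj, hs]; rfl]
      rw [ih pal, hs]
      obtain ⟨hp, hj'⟩ := h1
      subst hp; subst hj'
      simp
    · by_cases h2 : j = ','
      · have hIH := ih []
        rw [hs] at hIH
        simp only [List.headI_cons, List.tail_cons, reduceIte] at hIH
        rw [show pvScan pal (j :: rest) = ((pvScan [] rest).1.cons pal, (pvScan [] rest).2) from by
              rw [pvScan, if_neg h1, if_neg (by simp [h2])]]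
        rw [show pvSplit (j :: rest) = [] :: pvSplit rest from by rw [pvSplit, if_pos h2]]
        rw [hs]
        simp only [List.cons_append]
        rw [hIH]
        by_cases hp : pal = [] <;> simp [hp]
      · rw [show pvScan pal (j :: rest) = pvScan (pal ++ [j]) rest from by
              rw [pvScan, if_neg h1, if_pos h2]]
        rw [show pvSplit (j :: rest) = (j :: s0) :: ss from by
              rw [pvSplit, if_neg h2, hs]; rfl]
        rw [ih (pal ++ [j]), hs]
        by_cases hp : pal = []
        · have hjs : ¬ (j == ' ') = true := by
            simp only [beq_iff_eq]; exact fun h => h1 ⟨hp, h⟩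
          simp [hp, hjs]
        · simp [hp]

theorem pvTokenize_eq (l : List Char) : pvTokenize l = pvToks l := by
  unfold pvTokenize pvToks
  obtain ⟨s0, ss, hs⟩ := List.exists_cons_of_ne_nil (pvSplit_ne_nil l)
  have h := pvScan_split l []
  rw [hs] at h
  simp only [reduceIte] at h
  have hmap : (pvSplit l).map (fun seg => seg.dropWhile (· == ' '))
      = (pvScan [] l).1 ++ [(pvScan [] l).2] := by
    rw [hs]; simp only [List.map_cons, List.headI, List.tail] at h ⊢; rw [← h]
  rw [hmap]
  by_cases hfin : (pvScan [] l).2 = []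
  · simp [hfin]
  · simp [hfin]

theorem outer_fold (l2 : List Char) :
    ∀ (l pal : List Char) (c : Int),
    l.foldl (fun (st : Int × List Char) i =>
      if st.2 = [] ∧ i = ' ' then st
      else if i ≠ ',' then (st.1, st.2 ++ [i])
      else (similitudesInner l2 st.2 st.1, [])) (c, pal)
    = (c + (((pvScan pal l).1.map (fun x => ((pvToks l2).count x : Int))).sum), (pvScan pal l).2) := by
  intro l
  induction l with
  | nil => intro pal c; simp [pvScan]
  | cons j rest ih =>
    intro pal c
    simp only [List.foldl_cons, pvScan]
    split_ifs with h1 h2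
    · exact ih pal c
    · exact ih (pal ++ [j]) c
    · rw [ih [] (similitudesInner l2 pal c), similitudesInner_eq]
      simp [List.map_cons]; ring

-- ===== VERDICT (by name: the statement is the Claim_ definition above) =====
theorem similitudes_spec : Claim_equal_similitudes := by
  intro p1 p2 _
  unfold Spec_similitudes similitudes similitudes_alt
  simp only [pvTokenize_eq, PySem.Dict.getD_counter]
  rw [outer_fold p2.toList p1.toList [] 0]
  simp only [pvToks, List.map_append, List.sum_append]
  by_cases hfin : (pvScan [] p1.toList).2 = []
  · simp [hfin]
  · simp only [hfin, if_neg, ne_eq, not_false_iff, if_true]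
    rw [similitudesInner_eq]
    simp [pvToks, List.count_append]
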